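-- pv_equiv track=rewrite | github.com/cllorenz/fave-project | ad6/src/parser/iptables.py | _portrange_to_prefix_list
-- ===== SOURCE A (Python) =====
-- _PORT_BITS = 16
--
-- def _portrange_to_prefix_list(lower, upper):
--     """ Converts a range of ports to a list of prefixes.
--
--     Keyword arguments:
--     lower - the lowest port
--     upper - the highest port
--     """
--     assert all([lower >= 0, lower <= 65535, upper >= 0, upper <= 65535, lower <= upper])
--
--     res = []
--
--     if lower == upper:
--         return [(lower, _PORT_BITS)]
--
--     while lower < upper:
--         postfix = 0
--         for postfix in range(_PORT_BITS):
--             if (lower % (1 << (postfix + 1)) != 0) or (lower + (1 << (postfix + 1)) - 1 > upper):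
--                 break
--
--         res.append((lower, _PORT_BITS - postfix))
--         lower += (1 << postfix)
--
--     return res
-- ===== SOURCE B (Python) =====
-- _PORT_BITS = 16
--
-- def _block_exponent(lower, upper):
--     """Closed-form size (log2) of the largest aligned block starting at `lower`
--     that fits inside [lower, upper], capped at _PORT_BITS - 1."""
--     align = (lower & -lower).bit_length() - 1 if lower else _PORT_BITS
--     fit = (upper - lower + 1).bit_length() - 1
--     return min(min(align, fit), _PORT_BITS - 1)
--
-- def _portrange_to_prefix_list(lower, upper):
--     """Converts a range of ports to a list of prefixes."""
--     assert all([lower >= 0, lower <= 65535, upper >= 0, upper <= 65535, lower <= upper])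
--
--     if lower == upper:
--         return [(lower, _PORT_BITS)]
--
--     res = []
--     while lower < upper:
--         k = _block_exponent(lower, upper)
--         res.append((lower, _PORT_BITS - k))
--         lower += 1 << k
--     return res
-- ===== Notes on version B (the rewrite author's own statement) =====
-- stated objective: simpler
-- what changed: Replaces A's inner 16-iteration scan (for postfix in range(16)) by a closed-form block exponent computed with bit arithmetic: min of the trailing-zero count of lower (via lower & -lower, 16 if lower == 0), the bit length of the remaining range size minus one, and 15.
import Mathlib
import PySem

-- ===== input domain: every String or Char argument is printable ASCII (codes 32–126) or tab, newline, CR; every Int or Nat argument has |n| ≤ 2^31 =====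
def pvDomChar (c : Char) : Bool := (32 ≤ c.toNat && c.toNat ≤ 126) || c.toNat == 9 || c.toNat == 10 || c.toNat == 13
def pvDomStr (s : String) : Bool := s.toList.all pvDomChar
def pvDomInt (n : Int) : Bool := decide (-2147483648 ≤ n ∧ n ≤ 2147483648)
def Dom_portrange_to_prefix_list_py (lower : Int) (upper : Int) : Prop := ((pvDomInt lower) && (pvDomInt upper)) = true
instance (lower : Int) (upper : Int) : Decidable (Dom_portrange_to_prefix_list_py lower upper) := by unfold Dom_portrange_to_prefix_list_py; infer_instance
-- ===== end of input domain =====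

-- B replaces A's inner 16-step alignment scan by a closed-form block exponent from
-- bit arithmetic (trailing zeros of `lower`, bit length of the range size); objective:
-- simpler (no inner loop). Return-value equivalence on A's asserted domain.

-- ===== PORT A =====
-- inner `for postfix in range(16)` with its break condition
def pvAForAux (lower upper : Int) : Nat → Nat → Nat
  | 0, _ => 15
  | r + 1, p =>
    if PySem.Int.mod lower ((1 : Int) <<< (p + 1)) ≠ 0 ∨ lower + (1 : Int) <<< (p + 1) - 1 > upper then p
    else pvAForAux lower upper r (p + 1)

def pvAFor (lower upper : Int) : Nat := pvAForAux lower upper 16 0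

theorem pv_one_shiftLeft_pos (k : Nat) : (0 : Int) < (1 : Int) <<< k := by
  rw [Int.shiftLeft_eq]; positivity

-- outer `while lower < upper` accumulating `res`
def pvALoop (upper lower : Int) (res : List (Int × Int)) : List (Int × Int) :=
  if _h : lower < upper then
    pvALoop upper (lower + (1 : Int) <<< pvAFor lower upper)
      (res ++ [(lower, 16 - (pvAFor lower upper : Int))])
  else res
termination_by (upper - lower).toNat
decreasing_by
  have h2 := pv_one_shiftLeft_pos (pvAFor lower upper)
  omega

def portrange_to_prefix_list_py (lower : Int) (upper : Int) : List (Int × Int) :=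
  if lower = upper then [(lower, 16)] else pvALoop upper lower []

-- ===== PORT B =====
-- port of the helper `_block_exponent`
def pvBExp (lower upper : Int) : Nat :=
  min (min (if lower = 0 then 16 else PySem.Int.bitLength (PySem.Int.band lower (-lower)) - 1)
    (PySem.Int.bitLength (upper - lower + 1) - 1)) 15

def pvBLoop (upper lower : Int) (res : List (Int × Int)) : List (Int × Int) :=
  if _h : lower < upper then
    pvBLoop upper (lower + (1 : Int) <<< pvBExp lower upper)
      (res ++ [(lower, 16 - (pvBExp lower upper : Int))])
  else res
termination_by (upper - lower).toNat
decreasing_by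
  have h2 := pv_one_shiftLeft_pos (pvBExp lower upper)
  omega

def portrange_to_prefix_list_py_alt (lower : Int) (upper : Int) : List (Int × Int) :=
  if lower = upper then [(lower, 16)] else pvBLoop upper lower []

-- ===== PRECONDITION & SPEC =====
-- Pre_: exactly A's assert (0 <= lower <= upper <= 65535); outside it A raises AssertionError.
def Pre_portrange_to_prefix_list_py (lower : Int) (upper : Int) : Prop :=
  0 ≤ lower ∧ lower ≤ upper ∧ upper ≤ 65535
instance (lower : Int) (upper : Int) : Decidable (Pre_portrange_to_prefix_list_py lower upper) := by
  unfold Pre_portrange_to_prefix_list_py; infer_instance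

def pvWitness_portrange_to_prefix_list_py : Int × Int := (3, 17)

def Spec_portrange_to_prefix_list_py (lower : Int) (upper : Int) (out : List (Int × Int)) : Prop :=
  out = portrange_to_prefix_list_py_alt lower upper
instance (lower : Int) (upper : Int) (out : List (Int × Int)) :
    Decidable (Spec_portrange_to_prefix_list_py lower upper out) := by
  unfold Spec_portrange_to_prefix_list_py; infer_instance

-- ===== CLAIM (what is proved, stated in full; the proofs are below) =====
def Claim_equal_portrange_to_prefix_list_py : Prop :=
  ∀ (lower : Int) (upper : Int), Dom_portrange_to_prefix_list_py lower upper →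
    Pre_portrange_to_prefix_list_py lower upper →
    Spec_portrange_to_prefix_list_py lower upper (portrange_to_prefix_list_py lower upper)

-- ===== LEMMAS AND PROOFS =====

-- clearing the lowest set bit: (2^t·m) &&& (2^t·m − 1) drops exactly 2^t (m odd)
theorem pv_lowbit (t : Nat) : ∀ m : Nat, m % 2 = 1 →
    (2 ^ t * m) &&& (2 ^ t * m - 1) = 2 ^ t * m - 2 ^ t := by
  induction t with
  | zero =>
    intro m hm
    have h1 : m = Nat.bit true (m / 2) := by simp [Nat.bit_val]; omega
    have h2 : m - 1 = Nat.bit false (m / 2) := by simp [Nat.bit_val]; omega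
    calc (2 ^ 0 * m) &&& (2 ^ 0 * m - 1)
        = Nat.bit true (m / 2) &&& Nat.bit false (m / 2) := by rw [pow_zero, one_mul, ← h1, ← h2]
      _ = Nat.bit (true && false) ((m / 2) &&& (m / 2)) := Nat.land_bit ..
      _ = 2 * (m / 2) := by simp [Nat.bit_val]
      _ = 2 ^ 0 * m - 2 ^ 0 := by simp; omega
  | succ t ih =>
    intro m hm
    have hm1 : 1 ≤ m := by omega
    have hX : 1 ≤ 2 ^ t * m := Nat.one_le_iff_ne_zero.mpr (by positivity)
    have e4 : 2 ^ (t + 1) * m = 2 * (2 ^ t * m) := by ring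
    have e5 : (2 : Nat) ^ (t + 1) = 2 * 2 ^ t := by ring
    have e1 : 2 ^ (t + 1) * m = Nat.bit false (2 ^ t * m) := by simp [Nat.bit_val]; ring
    have e2 : 2 ^ (t + 1) * m - 1 = Nat.bit true (2 ^ t * m - 1) := by
      simp [Nat.bit_val]; omega
    have ht : 2 ^ t ≤ 2 ^ t * m := Nat.le_mul_of_pos_right _ (by omega)
    calc (2 ^ (t + 1) * m) &&& (2 ^ (t + 1) * m - 1)
        = Nat.bit false (2 ^ t * m) &&& Nat.bit true (2 ^ t * m - 1) := by
          conv_lhs => rw [e2, e1]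
      _ = Nat.bit (false && true) ((2 ^ t * m) &&& (2 ^ t * m - 1)) := Nat.land_bit ..
      _ = 2 * (2 ^ t * m - 2 ^ t) := by rw [ih m hm]; simp [Nat.bit_val]
      _ = 2 ^ (t + 1) * m - 2 ^ (t + 1) := by omega
  -- (the last omega uses e4, e5, ht via the context)

-- n &&& -n over Python ints picks out the lowest set bit
theorem pv_band_lowbit (n : Nat) (hn : 0 < n) :
    PySem.Int.band (n : Int) (-(n : Int)) = ((2 ^ (n.factorization 2) : Nat) : Int) := by
  have hc1 : (0 : Int) ≤ (n : Int) := by positivity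
  have hc2 : ¬ (0 : Int) ≤ -(n : Int) := by omega
  have hval : PySem.Int.band (n : Int) (-(n : Int)) = ((n - (n &&& (n - 1)) : Nat) : Int) := by
    simp only [PySem.Int.band, if_pos hc1, if_neg hc2]
    have ha : ((n : Int)).toNat = n := Int.toNat_natCast n
    have hb : (-(-(n : Int)) - 1).toNat = n - 1 := by omega
    rw [ha, hb]
  obtain ⟨t, ht⟩ : ∃ t, n.factorization 2 = t := ⟨_, rfl⟩
  rw [ht]
  have hdvd : 2 ^ t ∣ n :=
    (Nat.Prime.pow_dvd_iff_le_factorization Nat.prime_two (by omega)).mpr (le_of_eq ht.symm)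
  obtain ⟨m, hfac⟩ := hdvd
  have hodd : m % 2 = 1 := by
    by_contra hco
    have h2 : 2 ∣ m := by omega
    obtain ⟨c, hc⟩ := h2
    have hdd : 2 ^ (t + 1) ∣ n := ⟨c, by rw [hfac, hc]; ring⟩
    have := (Nat.Prime.pow_dvd_iff_le_factorization Nat.prime_two (by omega)).mp hdd
    rw [ht] at this
    omega
  have hm1 : 0 < m := by
    rcases Nat.eq_zero_or_pos m with h | h
    · subst h; simp at hfac; omega
    · exact h
  have hnat : n - (n &&& (n - 1)) = 2 ^ t := by
    conv_lhs => rw [hfac]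
    rw [pv_lowbit t m hodd]
    have ht2 : 2 ^ t ≤ 2 ^ t * m := Nat.le_mul_of_pos_right _ hm1
    generalize hg : 2 ^ t * m = X at ht2 ⊢
    generalize hq : 2 ^ t = P at ht2 ⊢
    omega
  rw [hval, hnat]

theorem pv_bitLength_two_pow (t : Nat) : PySem.Int.bitLength ((2 ^ t : Nat) : Int) = t + 1 := by
  induction t with
  | zero => decide
  | succ t ih =>
    have h := PySem.Int.bitLength_natCast (m := 2 ^ (t + 1)) (by positivity)
    have he : 2 ^ (t + 1) / 2 = 2 ^ t := by
      rw [pow_succ, Nat.mul_div_cancel]; omega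
    rw [h, he, ih]

theorem pv_shift_one (e : Nat) : (1 : Int) <<< e = ((2 ^ e : Nat) : Int) := by
  rw [Int.shiftLeft_eq]; push_cast; ring

-- divisibility by 1 << e in terms of the 2-adic valuation
theorem pv_dvd_iff (n : Nat) (hn : 0 < n) (e : Nat) :
    ((1 : Int) <<< e ∣ (n : Int)) ↔ e ≤ n.factorization 2 := by
  rw [pv_shift_one, Int.natCast_dvd_natCast]
  exact Nat.Prime.pow_dvd_iff_le_factorization Nat.prime_two (by omega)

-- the Python `%` test: lower % (1 << e) == 0  ↔  (1 << e) ∣ lower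
theorem pv_mod_zero_iff (a : Int) (e : Nat) :
    PySem.Int.mod a ((1 : Int) <<< e) = 0 ↔ (1 : Int) <<< e ∣ a := by
  have hpos : (0 : Int) ≤ (1 : Int) <<< e := le_of_lt (pv_one_shiftLeft_pos e)
  simp only [PySem.Int.mod, Int.fmod_eq_emod]
  rw [if_pos (Or.inl hpos), add_zero]
  exact ⟨fun h => Int.dvd_of_emod_eq_zero h, fun h => Int.emod_eq_zero_of_dvd h⟩

-- the two component limits of pvBExp
def pvAL (lower : Int) : Nat :=
  if lower = 0 then 16 else PySem.Int.bitLength (PySem.Int.band lower (-lower)) - 1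
def pvF (lower upper : Int) : Nat := PySem.Int.bitLength (upper - lower + 1) - 1

theorem pvBExp_def (lower upper : Int) :
    pvBExp lower upper = min (min (pvAL lower) (pvF lower upper)) 15 := rfl

theorem pvAL_eq (lower : Int) (h0 : 0 < lower) : pvAL lower = lower.toNat.factorization 2 := by
  have hln : lower = (lower.toNat : Int) := by omega
  rw [pvAL, if_neg (by omega)]
  conv_lhs => rw [hln]
  rw [pv_band_lowbit lower.toNat (by omega), pv_bitLength_two_pow]
  omega

theorem pv_dvd_of_lt (lower : Int) (hl : 0 ≤ lower) (p : Nat) (hp : p < pvAL lower) :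
    (1 : Int) <<< (p + 1) ∣ lower := by
  by_cases h0 : lower = 0
  · simp [h0]
  · rw [pvAL_eq lower (by omega)] at hp
    have hln : lower = (lower.toNat : Int) := by omega
    rw [hln]
    exact (pv_dvd_iff lower.toNat (by omega) (p + 1)).mpr (by omega)

theorem pv_lt_of_dvd (lower : Int) (hl : 0 ≤ lower) (p : Nat) (hp16 : p < 16)
    (h : (1 : Int) <<< (p + 1) ∣ lower) : p < pvAL lower := by
  by_cases h0 : lower = 0
  · rw [pvAL, if_pos h0]; omega
  · rw [pvAL_eq lower (by omega)]
    have hln : lower = (lower.toNat : Int) := by omega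
    rw [hln] at h
    have := (pv_dvd_iff lower.toNat (by omega) (p + 1)).mp h
    omega

theorem pvF_bounds (lower upper : Int) (h : lower < upper) :
    (2 : Nat) ^ pvF lower upper ≤ (upper - lower + 1).natAbs ∧
      (upper - lower + 1).natAbs < 2 ^ (pvF lower upper + 1) := by
  set size : Int := upper - lower + 1 with hsize
  have hs2 : 2 ≤ size := by omega
  have hup := PySem.Int.lt_two_pow_bitLength size
  have hbl1 : 1 ≤ PySem.Int.bitLength size := by
    by_contra hco
    have hb0 : PySem.Int.bitLength size = 0 := by omega
    have hup2 := hup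
    rw [hb0] at hup2
    norm_num at hup2
    omega
  have hlow := PySem.Int.two_pow_bitLength_le size (by omega)
  constructor
  · exact hlow
  · have he : pvF lower upper + 1 = PySem.Int.bitLength size := by rw [pvF, ← hsize]; omega
    rw [he]; exact hup

theorem pv_fit_le (lower upper : Int) (h : lower < upper) (p : Nat) (hp : p < pvF lower upper) :
    ¬ (lower + (1 : Int) <<< (p + 1) - 1 > upper) := by
  obtain ⟨hlow, _⟩ := pvF_bounds lower upper h
  have h1 : (2 : Nat) ^ (p + 1) ≤ 2 ^ pvF lower upper := Nat.pow_le_pow_right (by omega) (by omega)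
  rw [pv_shift_one]
  have h2 : ((2 ^ (p + 1) : Nat) : Int) ≤ ((2 ^ pvF lower upper : Nat) : Int) := by exact_mod_cast h1
  have h3 : ((2 ^ pvF lower upper : Nat) : Int) ≤ ((upper - lower + 1).natAbs : Int) := by
    exact_mod_cast hlow
  omega

theorem pv_fit_gt (lower upper : Int) (h : lower < upper) (p : Nat) (hp : pvF lower upper ≤ p) :
    lower + (1 : Int) <<< (p + 1) - 1 > upper := by
  obtain ⟨_, hhigh⟩ := pvF_bounds lower upper h
  have h1 : (2 : Nat) ^ (pvF lower upper + 1) ≤ 2 ^ (p + 1) := Nat.pow_le_pow_right (by omega) (by omega)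
  rw [pv_shift_one]
  have h2 : ((2 ^ (pvF lower upper + 1) : Nat) : Int) ≤ ((2 ^ (p + 1) : Nat) : Int) := by
    exact_mod_cast h1
  have h3 : (((upper - lower + 1).natAbs : Nat) : Int) < ((2 ^ (pvF lower upper + 1) : Nat) : Int) := by
    exact_mod_cast hhigh
  omega

-- A's bounded scan lands exactly on B's closed-form exponent
theorem pvAForAux_eq (lower upper : Int) (hl : 0 ≤ lower) (hlu : lower < upper) :
    ∀ (r p : Nat), p + r = 16 → p ≤ pvBExp lower upper →
      pvAForAux lower upper r p = pvBExp lower upper := by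
  have hKb := pvBExp_def lower upper
  intro r
  induction r with
  | zero =>
    intro p h1 h2
    omega
  | succ r ih =>
    intro p h1 h2
    by_cases hpK : p = pvBExp lower upper
    · subst hpK
      set K := pvBExp lower upper with hK
      show (if _ then _ else _) = K
      by_cases hc : PySem.Int.mod lower ((1 : Int) <<< (K + 1)) ≠ 0 ∨
          lower + (1 : Int) <<< (K + 1) - 1 > upper
      · rw [if_pos hc]
      · rw [if_neg hc]
        push Not at hc
        obtain ⟨hc1, hc2⟩ := hc
        have hdvd : (1 : Int) <<< (K + 1) ∣ lower := (pv_mod_zero_iff lower (K + 1)).mp hc1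
        have hKAL : K < pvAL lower := pv_lt_of_dvd lower hl K (by omega) hdvd
        have hKF : K < pvF lower upper := by
          by_contra hco
          exact absurd (pv_fit_gt lower upper hlu K (by omega)) (by omega)
        have hK15 : K = 15 := by omega
        have hr : r = 0 := by omega
        rw [hr]
        show (15 : Nat) = K
        omega
    · have hpltK : p < pvBExp lower upper := by omega
      have hpAL : p < pvAL lower := by omega
      have hpF : p < pvF lower upper := by omega
      show (if _ then _ else _) = _
      rw [if_neg ?_]
      · exact ih (p + 1) (by omega) (by omega)
      · push Not
        refine ⟨?_, ?_⟩
        · exact (pv_mod_zero_iff lower (p + 1)).mpr (pv_dvd_of_lt lower hl p hpAL)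
        · have := pv_fit_le lower upper hlu p hpF
          omega

theorem pvAFor_eq (lower upper : Int) (hl : 0 ≤ lower) (hlu : lower < upper) :
    pvAFor lower upper = pvBExp lower upper := by
  have hKb := pvBExp_def lower upper
  exact pvAForAux_eq lower upper hl hlu 16 0 (by omega) (by omega)

theorem pv_loop_eq (upper : Int) (N : Nat) :
    ∀ (lower : Int) (res : List (Int × Int)), 0 ≤ lower → (upper - lower).toNat ≤ N →
      pvALoop upper lower res = pvBLoop upper lower res := by
  induction N with
  | zero =>
    intro lower res hl hN
    rw [pvALoop, pvBLoop, dif_neg (by omega), dif_neg (by omega)]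
  | succ N ih =>
    intro lower res hl hN
    by_cases h : lower < upper
    · rw [pvALoop, pvBLoop, dif_pos h, dif_pos h]
      have hK : pvAFor lower upper = pvBExp lower upper := pvAFor_eq lower upper hl h
      rw [hK]
      have hpos := pv_one_shiftLeft_pos (pvBExp lower upper)
      exact ih _ _ (by omega) (by omega)
    · rw [pvALoop, pvBLoop, dif_neg h, dif_neg h]

-- ===== VERDICT (by name: the statement is the Claim_ definition above) =====
theorem portrange_to_prefix_list_py_spec : Claim_equal_portrange_to_prefix_list_py := by
  intro lower upper hDom hPre
  obtain ⟨h1, h2, h3⟩ := hPre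
  unfold Spec_portrange_to_prefix_list_py portrange_to_prefix_list_py portrange_to_prefix_list_py_alt
  by_cases he : lower = upper
  · rw [if_pos he, if_pos he]
  · rw [if_neg he, if_neg he]
    exact pv_loop_eq upper (upper - lower).toNat lower [] h1 (le_refl _)
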